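-- pv_equiv track=rewrite | github.com/YiyongZhao/PhyloTracer | GD_Visualizer.py | get_count_dic
-- ===== SOURCE A (Python) =====
-- def get_count_dic(gene_duplications: list) -> dict:
--     """
--     Count unique gene duplication events by level
--
--     Args:
--         gene_duplications (list): List of tuples containing (gene_dup_id, level)
--
--     Returns:
--         dict: Dictionary with levels as keys and counts as values
--     """
--     count_dict = {}
--     seen_ids = set()
--
--     for dup_id, level in gene_duplications:
--         if dup_id not in seen_ids:
--             count_dict[level] = count_dict.get(level, 0) + 1
--             seen_ids.add(dup_id)
--
--     return count_dict
-- ===== SOURCE B (Python) =====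
-- def get_count_dic(gene_duplications: list) -> dict:
--     """
--     Count unique gene duplication events by level
--
--     Two-pass decomposition: first build an id -> first-seen-level table
--     (later occurrences of an id are ignored), then tally the table's values.
--     """
--     first_level = {}
--     for dup_id, level in gene_duplications:
--         first_level.setdefault(dup_id, level)
--     counts = {}
--     for lvl in first_level.values():
--         counts[lvl] = counts.get(lvl, 0) + 1
--     return counts
-- ===== Notes on version B (the rewrite author's own statement) =====
-- stated objective: alternative
-- what changed: Replaces A's fused single pass (seen-set + running count dict) with a two-pass decomposition: first build an id -> first-seen-level table via setdefault, then tally that table's values into the count dict.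
import Mathlib
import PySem

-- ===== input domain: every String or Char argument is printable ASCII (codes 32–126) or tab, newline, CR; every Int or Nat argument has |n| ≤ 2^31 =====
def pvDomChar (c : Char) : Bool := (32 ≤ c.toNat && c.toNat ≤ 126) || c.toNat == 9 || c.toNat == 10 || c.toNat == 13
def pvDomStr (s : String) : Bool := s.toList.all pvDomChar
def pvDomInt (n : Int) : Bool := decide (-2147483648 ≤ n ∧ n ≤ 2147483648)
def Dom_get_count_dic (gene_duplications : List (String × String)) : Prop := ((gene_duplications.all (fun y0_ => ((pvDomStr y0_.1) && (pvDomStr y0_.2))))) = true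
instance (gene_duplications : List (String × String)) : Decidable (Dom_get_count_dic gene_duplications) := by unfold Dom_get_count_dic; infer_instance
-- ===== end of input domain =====

-- B separates the work into two passes (id -> first-seen-level table, then a tally of its values)
-- instead of A's fused single pass with a seen-set; objective: alternative decomposition, same cost.


-- ===== PORT A =====
-- single pass: count_dict[level] += 1 the first time each dup_id is seen
def get_count_dic (gene_duplications : List (String × String)) : List (String × Int) :=
  (gene_duplications.foldl
    (fun (st : PySem.Dict String Int × PySem.Set String) p =>
      if st.2.contains p.1 then st
      else (st.1.insert p.2 (st.1.getD p.2 0 + 1), st.2.add p.1))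
    (PySem.Dict.empty, PySem.Set.empty)).1.items

-- ===== PORT B =====
-- pass 1: first_level.setdefault(dup_id, level); pass 2: tally first_level.values()
def get_count_dic_alt (gene_duplications : List (String × String)) : List (String × Int) :=
  let first_level := gene_duplications.foldl
    (fun (d : PySem.Dict String String) p => d.setdefault p.1 p.2) PySem.Dict.empty
  let counts := first_level.values.foldl
    (fun (c : PySem.Dict String Int) v => c.insert v (c.getD v 0 + 1)) PySem.Dict.empty
  counts.items

-- ===== PRECONDITION & SPEC =====
def Spec_get_count_dic (gene_duplications : List (String × String)) (out : List (String × Int)) : Prop := out = get_count_dic_alt gene_duplications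
instance (gene_duplications : List (String × String)) (out : List (String × Int)) : Decidable (Spec_get_count_dic gene_duplications out) := by unfold Spec_get_count_dic; infer_instance

-- ===== CLAIM (what is proved, stated in full; the proofs are below) =====
def Claim_equal_get_count_dic : Prop := ∀ (gene_duplications : List (String × String)), Dom_get_count_dic gene_duplications → Spec_get_count_dic gene_duplications (get_count_dic gene_duplications)

-- ===== LEMMAS AND PROOFS =====

-- Invariant: with A's state initialized from an arbitrary first-level table d
-- (dict part = tally of d's values, seen part = d's keys), A's fold computes the
-- tally of the values of (B's setdefault-fold continued from d).
theorem pv_invariant (l : List (String × String)) (d : PySem.Dict String String)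
    (hnd : d.keys.Nodup) :
    (l.foldl
      (fun (st : PySem.Dict String Int × PySem.Set String) p =>
        if st.2.contains p.1 then st
        else (st.1.insert p.2 (st.1.getD p.2 0 + 1), st.2.add p.1))
      (PySem.Dict.counter d.values, d.keys)).1
    = PySem.Dict.counter
        ((l.foldl (fun (d : PySem.Dict String String) p => d.setdefault p.1 p.2) d).values) := by
  induction l generalizing d with
  | nil => rfl
  | cons p rest ih =>
    obtain ⟨id, lvl⟩ := p
    simp only [List.foldl_cons]
    by_cases hm : id ∈ d.keys
    · have hc : d.contains id = true := (PySem.Dict.contains_iff_mem_keys d id).mpr hm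
      rw [PySem.Dict.setdefault_of_contains d lvl hc]
      simpa [PySem.Set.contains, hm] using ih d hnd
    · have hc' : d.contains id = false := by
        rcases Bool.eq_false_or_eq_true (d.contains id) with h | h
        · exact absurd ((PySem.Dict.contains_iff_mem_keys d id).mp h) hm
        · exact h
      rw [PySem.Dict.setdefault_of_not_contains d lvl hc']
      have hvals : (d.insert id lvl).values = d.values ++ [lvl] := by
        simp [PySem.Dict.values, PySem.Dict.items_insert_of_not_contains d lvl hc']
      have hkeys : (d.insert id lvl).keys = d.keys ++ [id] :=
        PySem.Dict.keys_insert_of_not_contains d lvl hc'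
      have hcnt : (PySem.Dict.counter d.values).insert lvl
          (((d.values.count lvl : Int)) + 1)
          = PySem.Dict.counter (d.values ++ [lvl]) := by
        rw [PySem.Dict.counter_append_singleton]
        simp [PySem.Dict.modify, PySem.Dict.getD_counter]
      have hnd' := PySem.Dict.nodup_keys_insert d id lvl hnd
      have h2 := ih (d.insert id lvl) hnd'
      rw [hvals, hkeys] at h2
      simpa [PySem.Set.add, PySem.Set.contains, hm, hcnt, PySem.Dict.getD_counter] using h2

-- ===== VERDICT (by name: the statement is the Claim_ definition above) =====
theorem get_count_dic_spec : Claim_equal_get_count_dic := by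
  intro gds _
  show get_count_dic gds = get_count_dic_alt gds
  have h := pv_invariant gds PySem.Dict.empty (by simp [PySem.Dict.keys_empty])
  simp only [get_count_dic, get_count_dic_alt, PySem.Dict.foldl_insert_getD_add_one_eq_counter]
  exact congrArg PySem.Dict.items h
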